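-- pv_equiv track=rewrite | github.com/pypi-data/pypi-mirror-156 | packages/yawp/yawp-0.7.1.tar.gz/yawp-0.7.1/yawp/__init__.py | uppunqshr
-- ===== SOURCE A (Python) =====
-- def uppunqshr(string, quotes='"'):
--     '''uppercase unquoted chars in shrunk string
-- '''
--     result = ''; quote = ''
--     for char in ' '.join(string.split()): # ... in shrink(string):
--         if quote:
--             result += char
--             if char == quote:
--                 quote = ''
--         else:
--             result += char.upper()
--             if char in quotes:
--                 quote = char
--     return result
-- ===== SOURCE B (Python) =====
-- def uppunqshr(string, quotes='"'):
--     '''uppercase unquoted chars in shrunk string'''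
--     s = ' '.join(string.split())
--     parts = []
--     i, n = 0, len(s)
--     while i < n:
--         j = i
--         while j < n and s[j] not in quotes:   # scan the unquoted chunk
--             j += 1
--         if j == n:
--             parts.append(s[i:].upper())       # no opening delimiter left
--             break
--         parts.append(s[i:j + 1].upper())      # unquoted chunk incl. opening delimiter
--         k = s.find(s[j], j + 1)               # closer must be the same character
--         if k == -1:
--             parts.append(s[j + 1:])           # unterminated quote: tail verbatim
--             break
--         parts.append(s[j + 1:k + 1])          # quoted chunk incl. closer, verbatim
--         i = k + 1
--     return ''.join(parts)
-- ===== Notes on version B (the rewrite author's own statement) =====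
-- stated objective: alternative
-- what changed: Replaces A's character-by-character state machine (quote flag carried through one fold) by a chunk-wise scanner that slices the shrunk string at quote delimiters: it uppercases each whole unquoted slice including the opening delimiter, copies the quoted slice verbatim up to the matching closer found with str.find, and recurses on the tail.
import Mathlib
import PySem

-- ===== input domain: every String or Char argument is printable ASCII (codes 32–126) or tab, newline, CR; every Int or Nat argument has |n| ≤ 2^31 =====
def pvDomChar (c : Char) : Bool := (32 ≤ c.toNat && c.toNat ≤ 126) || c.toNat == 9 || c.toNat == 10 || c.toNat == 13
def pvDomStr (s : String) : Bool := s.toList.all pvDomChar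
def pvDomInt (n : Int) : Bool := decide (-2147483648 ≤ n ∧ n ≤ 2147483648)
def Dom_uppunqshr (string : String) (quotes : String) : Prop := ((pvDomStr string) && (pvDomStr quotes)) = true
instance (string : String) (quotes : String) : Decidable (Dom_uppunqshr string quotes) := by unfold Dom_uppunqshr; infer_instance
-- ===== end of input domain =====

-- B re-implements A as a chunk-wise slicing scanner instead of a per-character state machine;
-- objective: alternative decomposition (same O(n) cost), equal return value on all inputs.

-- ===== PORT A =====
-- the loop body of A: state (result, quote), quote is '' or a one-char string
def pvStepA (quotes : List Char) (acc : List Char × List Char) (char : Char) : List Char × List Char :=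
  if acc.2 ≠ [] then
    let result := acc.1 ++ [char]
    if [char] = acc.2 then (result, []) else (result, acc.2)
  else
    let result := acc.1 ++ [PySem.Chars.upperChar char]
    if quotes.contains char then (result, [char]) else (result, acc.2)

def uppunqshr (string : String) (quotes : String) : String :=
  let s := PySem.Chars.join [' '] (PySem.Chars.split₀ string.toList)   -- ' '.join(string.split())
  String.ofList (s.foldl (pvStepA quotes.toList) ([], [])).1

-- ===== PORT B =====
-- B's recursive helper go: slice up to and incl. the first quote char, uppercase it; copy the
-- quoted slice verbatim up to the matching closer (find); recurse on the tail.
def pvGoB (quotes : List Char) (s : List Char) : List Char :=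
  let pre := s.takeWhile (fun c => !quotes.contains c)
  match h : s.dropWhile (fun c => !quotes.contains c) with
  | [] => PySem.Chars.upper s
  | q :: rest =>
    match rest.findIdx? (fun c => c == q) with
    | none => PySem.Chars.upper (pre ++ [q]) ++ rest
    | some k => PySem.Chars.upper (pre ++ [q]) ++ rest.take (k+1) ++ pvGoB quotes (rest.drop (k+1))
termination_by s.length
decreasing_by
  have h1 : (s.dropWhile (fun c => !quotes.contains c)).length ≤ s.length :=
    List.length_dropWhile_le _ _
  rw [h] at h1
  have h2 : (rest.drop (k+1)).length ≤ rest.length := by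
    rw [List.length_drop]; omega
  simp at h1 ⊢
  omega

def uppunqshr_alt (string : String) (quotes : String) : String :=
  String.ofList (pvGoB quotes.toList (PySem.Chars.join [' '] (PySem.Chars.split₀ string.toList)))

-- ===== PRECONDITION & SPEC =====
def Spec_uppunqshr (string : String) (quotes : String) (out : String) : Prop := out = uppunqshr_alt string quotes
instance (string : String) (quotes : String) (out : String) : Decidable (Spec_uppunqshr string quotes out) := by unfold Spec_uppunqshr; infer_instance

-- ===== CLAIM (what is proved, stated in full; the proofs are below) =====
def Claim_equal_uppunqshr : Prop := ∀ (string : String) (quotes : String), Dom_uppunqshr string quotes → Spec_uppunqshr string quotes (uppunqshr string quotes)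

-- ===== LEMMAS AND PROOFS =====

theorem pv_upper_eq_map (l : List Char) : PySem.Chars.upper l = l.map PySem.Chars.upperChar := by
  simp [PySem.Chars.upper]

theorem pv_stepA_decomp (qs : List Char) (res q : List Char) (c : Char) :
    pvStepA qs (res, q) c = (res ++ (pvStepA qs ([], q) c).1, (pvStepA qs ([], q) c).2) := by
  simp only [pvStepA]
  split_ifs <;> simp_all

theorem pv_foldA_acc (qs : List Char) (l : List Char) (res q : List Char) :
    l.foldl (pvStepA qs) (res, q)
      = (res ++ (l.foldl (pvStepA qs) ([], q)).1, (l.foldl (pvStepA qs) ([], q)).2) := by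
  induction l generalizing res q with
  | nil => simp
  | cons c t ih =>
    simp only [List.foldl_cons]
    rw [pv_stepA_decomp]
    rcases hs : pvStepA qs ([], q) c with ⟨δ, q'⟩
    rw [ih, ih δ q']
    simp

theorem pv_foldA_unquoted (qs : List Char) (pre : List Char)
    (h : ∀ c ∈ pre, qs.contains c = false) (res : List Char) :
    pre.foldl (pvStepA qs) (res, []) = (res ++ pre.map PySem.Chars.upperChar, []) := by
  induction pre generalizing res with
  | nil => simp
  | cons c t ih =>
    have hc : qs.contains c = false := h c (List.mem_cons_self ..)
    simp only [List.foldl_cons, pvStepA, hc]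
    simp only [ne_eq, not_true_eq_false, if_false, Bool.false_eq_true]
    rw [ih (fun c hm => h c (List.mem_cons_of_mem _ hm))]
    simp

theorem pv_foldA_quoted (qs : List Char) (seg : List Char) (q : Char)
    (h : q ∉ seg) (res : List Char) :
    seg.foldl (pvStepA qs) (res, [q]) = (res ++ seg, [q]) := by
  induction seg generalizing res with
  | nil => simp
  | cons c t ih =>
    have hc : ¬([c] = [q]) := by
      intro he; apply h; simp at he; simp [he]
    simp only [List.foldl_cons, pvStepA]
    simp only [ne_eq, List.cons_ne_nil, not_false_eq_true, if_true, hc, if_false]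
    rw [ih (fun hm => h (List.mem_cons_of_mem _ hm))]
    simp

theorem pv_dropWhile_head_false {p : Char → Bool} {s : List Char} {q : Char} {rest : List Char}
    (h : s.dropWhile p = q :: rest) : p q = false := by
  induction s with
  | nil => simp at h
  | cons c t ih =>
    by_cases hc : p c
    · rw [List.dropWhile_cons_of_pos hc] at h; exact ih h
    · rw [List.dropWhile_cons_of_neg hc] at h
      cases h; simpa using hc

theorem pv_main (qs : List Char) (s : List Char) :
    (s.foldl (pvStepA qs) ([], [])).1 = pvGoB qs s := by
  rw [pvGoB]
  cases hd : s.dropWhile (fun c => !qs.contains c) with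
  | nil =>
    have hall : ∀ c ∈ s, qs.contains c = false := by
      intro c hm
      have := (List.dropWhile_eq_nil_iff).1 hd c hm
      simpa using this
    have hs : s.takeWhile (fun c => !qs.contains c) = s :=
      List.takeWhile_eq_self_iff.2 (by intro x hm; simp only [Bool.not_eq_true']; exact hall x hm)
    rw [pv_foldA_unquoted qs s hall []]
    simp [pv_upper_eq_map]
  | cons q rest =>
    have hq : qs.contains q = true := by
      have := pv_dropWhile_head_false hd; simpa using this
    have hsplit : s = s.takeWhile (fun c => !qs.contains c) ++ q :: rest := by
      conv_lhs => rw [← List.takeWhile_append_dropWhile (p := fun c => !qs.contains c) (l := s)]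
      rw [hd]
    have hpre : ∀ c ∈ s.takeWhile (fun c => !qs.contains c), qs.contains c = false := by
      intro c hm
      have := List.mem_takeWhile_imp hm; simpa using this
    set pre := s.takeWhile (fun c => !qs.contains c) with hpredef
    cases hf : rest.findIdx? (fun c => c == q) with
    | none =>
      simp only [hf]
      have hnot : q ∉ rest := by
        intro hm
        have := List.findIdx?_eq_none_iff.1 hf q hm
        simp at this
      conv_lhs => rw [hsplit]
      rw [List.foldl_append, pv_foldA_unquoted qs pre hpre []]
      simp only [List.nil_append, List.foldl_cons, pvStepA, ne_eq, not_true_eq_false,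
        reduceIte, hq, if_true]
      rw [pv_foldA_quoted qs rest q hnot]
      simp [pv_upper_eq_map]
    | some k =>
      simp only [hf]
      obtain ⟨hk, hpk, hmin⟩ := List.findIdx?_eq_some_iff_getElem.1 hf
      have hqk : rest[k] = q := by simpa using hpk
      have hnot : q ∉ rest.take k := by
        intro hm
        obtain ⟨i, hi, hgi⟩ := List.getElem_of_mem hm
        have hik : i < k := by
          have := hi; rw [List.length_take] at this; omega
        have : (rest.take k)[i] = rest[i] := List.getElem_take
        exact hmin i hik (by simp [← this, hgi])
      have hseg0 : rest = rest.take k ++ q :: rest.drop (k+1) := by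
        conv_lhs => rw [← List.take_append_drop k rest]
        rw [List.drop_eq_getElem_cons hk, hqk]
      obtain ⟨seg, tail, hrest, hq2, hlen⟩ :
          ∃ seg tail, rest = seg ++ q :: tail ∧ q ∉ seg ∧ seg.length = k :=
        ⟨rest.take k, rest.drop (k+1), hseg0, hnot, by rw [List.length_take]; omega⟩
      have htake : rest.take (k+1) = seg ++ [q] := by
        rw [hrest, ← hlen, List.take_append]
        simp
      have hdrop : rest.drop (k+1) = tail := by
        rw [hrest, ← hlen, List.drop_append]
        simp
      rw [htake, hdrop]
      conv_lhs => rw [hsplit, hrest]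
      rw [List.foldl_append, pv_foldA_unquoted qs pre hpre []]
      simp only [List.nil_append, List.foldl_cons, pvStepA, ne_eq, not_true_eq_false,
        reduceIte, hq, if_true]
      rw [List.foldl_append, pv_foldA_quoted qs seg q hq2]
      simp only [List.foldl_cons, pvStepA, ne_eq, List.cons_ne_nil, not_false_eq_true,
        if_true]
      rw [pv_foldA_acc]
      have hrec := pv_main qs tail
      rw [hrec]
      simp [pv_upper_eq_map, List.append_assoc]
termination_by s.length
decreasing_by
  have h1 := congrArg List.length hsplit
  rw [hrest] at h1
  simp at h1
  omega

-- ===== VERDICT (by name: the statement is the Claim_ definition above) =====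
theorem uppunqshr_spec : Claim_equal_uppunqshr := by
  intro string quotes _
  unfold Spec_uppunqshr uppunqshr uppunqshr_alt
  exact congrArg String.ofList (pv_main _ _)
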